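-- pv_equiv track=rewrite | github.com/oxcandidate/ARG-Builder | python_scripts/hudson_bound.py | find_closest_disjoint_pairs
-- ===== SOURCE A (Python) =====
-- def find_disjoint_pairs(all_pairs, current_pairs, number_needed):
--     if number_needed == 0:
--         return current_pairs
--
--     if len(all_pairs) == 0:
--         return []
--
--     current_points = {i for pair in current_pairs for i in pair}
--
--     (i, j) = all_pairs[0]
--     if i in current_points or j in current_points:
--         return find_disjoint_pairs(all_pairs[1:], current_pairs[:], number_needed)
--     else:
--         result = find_disjoint_pairs(all_pairs[1:], current_pairs + [(i,j)], number_needed - 1)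
--         if result == []:
--             result = find_disjoint_pairs(all_pairs[1:], current_pairs[:], number_needed)
--
--         return result
--
-- def find_closest_disjoint_pairs(all_pairs, number_needed):
--     result = find_disjoint_pairs(all_pairs, [], number_needed)
--     if result == []:
--         return []
--
--     best_result = result
--     best_right = max([j for (i,j) in result])
--
--     while (True):
--         all_pairs = [(i,j) for (i,j) in all_pairs if j < best_right]
--         result = find_disjoint_pairs(all_pairs, [], number_needed)
--
--         if result != []:
--             best_result = result
--             best_right = max([j for (i,j) in result])
--         else:
--             break
--
--     return best_result
-- ===== SOURCE B (Python) =====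
-- def find_closest_disjoint_pairs(all_pairs, number_needed):
--     # Index-based backtracking over the fixed list with an incrementally
--     # maintained set of used points and a right-endpoint bound, instead of
--     # list slicing, point-set rebuilding and repeated list filtering.
--     def search(idx, used, need, bound):
--         if need == 0:
--             return []
--         if idx >= len(all_pairs):
--             return None
--         i, j = all_pairs[idx]
--         if (bound is None or j < bound) and i not in used and j not in used:
--             rest = search(idx + 1, used | {i, j}, need - 1, bound)
--             if rest is not None:
--                 return [(i, j)] + rest
--         return search(idx + 1, used, need, bound)
--
--     best = search(0, set(), number_needed, None)
--     if not best:
--         return []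
--     while True:
--         bound = max(j for _, j in best)
--         r = search(0, set(), number_needed, bound)
--         if not r:
--             return best
--         best = r
-- ===== Notes on version B (the rewrite author's own statement) =====
-- stated objective: faster
-- what changed: Replaced list slicing per recursion level, rebuilding the used-point set from scratch at every call, and the outer loop's repeated list refiltering by index-based backtracking over the fixed list with an incrementally maintained used-point set and a right-endpoint bound parameter.
import Mathlib
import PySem

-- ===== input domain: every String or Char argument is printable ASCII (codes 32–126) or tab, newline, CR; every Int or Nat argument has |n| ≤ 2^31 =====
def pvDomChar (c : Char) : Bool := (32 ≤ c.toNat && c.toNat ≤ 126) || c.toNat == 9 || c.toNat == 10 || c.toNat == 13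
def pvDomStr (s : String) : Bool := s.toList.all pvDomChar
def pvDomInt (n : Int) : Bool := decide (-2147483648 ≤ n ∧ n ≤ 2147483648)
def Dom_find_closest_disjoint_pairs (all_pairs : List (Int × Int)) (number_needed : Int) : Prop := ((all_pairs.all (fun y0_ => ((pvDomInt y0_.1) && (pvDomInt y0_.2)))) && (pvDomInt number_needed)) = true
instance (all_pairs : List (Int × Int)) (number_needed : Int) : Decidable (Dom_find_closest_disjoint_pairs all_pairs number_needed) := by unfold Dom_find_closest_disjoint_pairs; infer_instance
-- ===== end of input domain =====

-- B replaces A's list slicing, per-call point-set rebuilding and repeated list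
-- refiltering by index-based backtracking with an incrementally maintained used-point
-- set and a right-endpoint bound parameter (objective: faster by constant factors).

-- ===== PORT A =====
-- max([j for (i,j) in l]) as both Pythons write it (only ever applied to nonempty l)
def pvMaxRight (l : List (Int × Int)) : Int :=
  (PySem.List.max? (l.map (fun p => p.2)) (fun x => x)).getD 0

def find_disjoint_pairs (all_pairs : List (Int × Int)) (current_pairs : List (Int × Int)) (number_needed : Int) : List (Int × Int) :=
  if number_needed == 0 then current_pairs
  else match all_pairs with
  | [] => []
  | p :: rest =>
    let current_points : PySem.Set Int := PySem.Set.ofList (current_pairs.flatMap (fun q => [q.1, q.2]))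
    if PySem.Set.contains current_points p.1 || PySem.Set.contains current_points p.2 then
      find_disjoint_pairs rest current_pairs number_needed
    else
      let result := find_disjoint_pairs rest (current_pairs ++ [p]) (number_needed - 1)
      if result == [] then find_disjoint_pairs rest current_pairs number_needed
      else result

-- the 'while True' of A; each successful pass strictly shrinks the filtered list,
-- so fuel = length + 1 covers every pass the Python loop performs
def pvLoopA (fuel : Nat) (all_pairs : List (Int × Int)) (number_needed : Int) (best_result : List (Int × Int)) (best_right : Int) : List (Int × Int) :=
  match fuel with
  | 0 => best_result
  | fuel + 1 =>
    let aps := all_pairs.filter (fun p => decide (p.2 < best_right))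
    let result := find_disjoint_pairs aps [] number_needed
    if result != [] then pvLoopA fuel aps number_needed result (pvMaxRight result)
    else best_result

def find_closest_disjoint_pairs (all_pairs : List (Int × Int)) (number_needed : Int) : List (Int × Int) :=
  let result := find_disjoint_pairs all_pairs [] number_needed
  if result == [] then []
  else pvLoopA (all_pairs.length + 1) all_pairs number_needed result (pvMaxRight result)

-- ===== PORT B =====
-- 'bound is None or j < bound'
def pvBOk (bound : Option Int) (p : Int × Int) : Bool :=
  match bound with
  | none => true
  | some b => decide (p.2 < b)

def pvSearchB (pairs : List (Int × Int)) (idx : Nat) (used : PySem.Set Int) (need : Int) (bound : Option Int) : Option (List (Int × Int)) :=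
  if need == 0 then some []
  else if h : idx < pairs.length then
    let p := pairs[idx]
    if pvBOk bound p && !(PySem.Set.contains used p.1) && !(PySem.Set.contains used p.2) then
      match pvSearchB pairs (idx + 1) (PySem.Set.add (PySem.Set.add used p.1) p.2) (need - 1) bound with
      | some rest => some (p :: rest)
      | none => pvSearchB pairs (idx + 1) used need bound
    else pvSearchB pairs (idx + 1) used need bound
  else none
termination_by pairs.length - idx

-- the 'while True' of B; the bound strictly decreases each successful pass,
-- so fuel = length + 1 covers every pass the Python loop performs
def pvLoopB (fuel : Nat) (pairs : List (Int × Int)) (number_needed : Int) (best : List (Int × Int)) : List (Int × Int) :=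
  match fuel with
  | 0 => best
  | fuel + 1 =>
    let bound := pvMaxRight best
    match pvSearchB pairs 0 PySem.Set.empty number_needed (some bound) with
    | none => best
    | some r => if r == [] then best else pvLoopB fuel pairs number_needed r

def find_closest_disjoint_pairs_alt (all_pairs : List (Int × Int)) (number_needed : Int) : List (Int × Int) :=
  match pvSearchB all_pairs 0 PySem.Set.empty number_needed none with
  | none => []
  | some best => if best == [] then [] else pvLoopB (all_pairs.length + 1) all_pairs number_needed best

-- ===== PRECONDITION & SPEC =====
def Spec_find_closest_disjoint_pairs (all_pairs : List (Int × Int)) (number_needed : Int) (out : List (Int × Int)) : Prop := out = find_closest_disjoint_pairs_alt all_pairs number_needed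
instance (all_pairs : List (Int × Int)) (number_needed : Int) (out : List (Int × Int)) : Decidable (Spec_find_closest_disjoint_pairs all_pairs number_needed out) := by unfold Spec_find_closest_disjoint_pairs; infer_instance

-- ===== CLAIM (what is proved, stated in full; the proofs are below) =====
def Claim_equal_find_closest_disjoint_pairs : Prop := ∀ (all_pairs : List (Int × Int)) (number_needed : Int), Dom_find_closest_disjoint_pairs all_pairs number_needed → Spec_find_closest_disjoint_pairs all_pairs number_needed (find_closest_disjoint_pairs all_pairs number_needed)

-- ===== LEMMAS AND PROOFS =====
-- the points covered by a list of pairs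
def pvPts (l : List (Int × Int)) : List Int := l.flatMap (fun q => [q.1, q.2])

def pvInterp (cur : List (Int × Int)) (o : Option (List (Int × Int))) : List (Int × Int) :=
  match o with
  | none => []
  | some picks => cur ++ picks

-- A's search either fails with [] or returns cur ++ picks with every pick drawn from the list
theorem fdp_shape (ps : List (Int × Int)) : ∀ (cur : List (Int × Int)) (n : Int),
    find_disjoint_pairs ps cur n = [] ∨
    ∃ picks, find_disjoint_pairs ps cur n = cur ++ picks ∧ ∀ p ∈ picks, p ∈ ps := by
  induction ps with
  | nil =>
    intro cur n
    by_cases hn : n == 0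
    · exact Or.inr ⟨[], by simp [find_disjoint_pairs, hn], by simp⟩
    · exact Or.inl (by simp [find_disjoint_pairs, hn])
  | cons p rest ih =>
    intro cur n
    by_cases hn : n == 0
    · exact Or.inr ⟨[], by simp [find_disjoint_pairs, hn], by simp⟩
    · simp only [find_disjoint_pairs, hn]
      by_cases hc : (PySem.Set.contains (PySem.Set.ofList (cur.flatMap (fun q => [q.1, q.2]))) p.1 || PySem.Set.contains (PySem.Set.ofList (cur.flatMap (fun q => [q.1, q.2]))) p.2) = true
      · simp only [hc, if_true]
        rcases ih cur n with h | ⟨picks, he, hsub⟩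
        · exact Or.inl h
        · exact Or.inr ⟨picks, he, fun q hq => List.mem_cons_of_mem _ (hsub q hq)⟩
      · simp only [hc]
        by_cases hr : find_disjoint_pairs rest (cur ++ [p]) (n - 1) == []
        · simp only [hr, if_true]
          rcases ih cur n with h | ⟨picks, he, hsub⟩
          · exact Or.inl h
          · exact Or.inr ⟨picks, he, fun q hq => List.mem_cons_of_mem _ (hsub q hq)⟩
        · simp only [hr]
          rcases ih (cur ++ [p]) (n - 1) with h | ⟨picks, he, hsub⟩
          · simp [h] at hr
          · refine Or.inr ⟨p :: picks, by simp [he], fun q hq => ?_⟩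
            rcases List.mem_cons.mp hq with rfl | hq'
            · exact List.mem_cons_self
            · exact List.mem_cons_of_mem _ (hsub q hq')

theorem pvContains_eq {u : PySem.Set Int} {l : List Int} (hu : ∀ x : Int, x ∈ u ↔ x ∈ l) (x : Int) :
    (PySem.Set.ofList l).contains x = u.contains x := by
  by_cases hm : x ∈ l
  · have a1 : (PySem.Set.ofList l).contains x = true := by
      rw [PySem.Set.contains_iff, PySem.Set.mem_ofList]; exact hm
    have a2 : u.contains x = true := by
      rw [PySem.Set.contains_iff]; exact (hu x).mpr hm
    rw [a1, a2]
  · have a1 : (PySem.Set.ofList l).contains x = false := by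
      rw [Bool.eq_false_iff]; intro h
      rw [PySem.Set.contains_iff, PySem.Set.mem_ofList] at h; exact hm h
    have a2 : u.contains x = false := by
      rw [Bool.eq_false_iff]; intro h
      rw [PySem.Set.contains_iff] at h; exact hm ((hu x).mp h)
    rw [a1, a2]

-- core: A's search on the bound-filtered suffix = B's index search, given the
-- used set holds exactly the points of cur
theorem core_eq (k : Nat) : ∀ (idx : Nat) (pairs cur : List (Int × Int)) (u : PySem.Set Int) (n : Int) (b : Option Int),
    pairs.length - idx ≤ k →
    (∀ x : Int, x ∈ u ↔ x ∈ pvPts cur) →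
    find_disjoint_pairs ((pairs.drop idx).filter (pvBOk b)) cur n = pvInterp cur (pvSearchB pairs idx u n b) := by
  induction k with
  | zero =>
    intro idx pairs cur u n b hk hu
    by_cases hn : n == 0
    · rw [pvSearchB]
      cases e : (pairs.drop idx).filter (pvBOk b) <;> simp [find_disjoint_pairs, hn, pvInterp]
    · have hidx : ¬ idx < pairs.length := by omega
      have hdrop : pairs.drop idx = [] := List.drop_eq_nil_of_le (by omega)
      rw [pvSearchB, hdrop]
      simp [find_disjoint_pairs, hn, hidx, pvInterp]
  | succ k ih =>
    intro idx pairs cur u n b hk hu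
    by_cases hn : n == 0
    · rw [pvSearchB]
      cases e : (pairs.drop idx).filter (pvBOk b) <;> simp [find_disjoint_pairs, hn, pvInterp]
    · have hn' : (n == 0) = false := by simpa using hn
      by_cases hidx : idx < pairs.length
      · have hdrop : pairs.drop idx = pairs[idx] :: pairs.drop (idx + 1) := List.drop_eq_getElem_cons hidx
        have hk' : pairs.length - (idx + 1) ≤ k := by omega
        rw [pvSearchB, hdrop]
        simp only [List.filter_cons, hn', Bool.false_eq_true, if_false, dif_pos hidx]
        by_cases hb : pvBOk b pairs[idx] = true
        · have e1 : (PySem.Set.ofList (cur.flatMap fun q => [q.1, q.2])).contains pairs[idx].1 = u.contains pairs[idx].1 :=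
            pvContains_eq (fun x => by simpa [pvPts] using hu x) _
          have e2 : (PySem.Set.ofList (cur.flatMap fun q => [q.1, q.2])).contains pairs[idx].2 = u.contains pairs[idx].2 :=
            pvContains_eq (fun x => by simpa [pvPts] using hu x) _
          simp only [hb, Bool.true_and]
          by_cases hc1 : u.contains pairs[idx].1 = true
          · simp only [hc1, Bool.not_true, Bool.false_and, Bool.false_eq_true, if_false]
            simp only [find_disjoint_pairs, hn', Bool.false_eq_true, if_false, e1, e2, hc1, Bool.true_or, if_true]
            exact ih (idx + 1) pairs cur u n b hk' hu
          · have hc1' : u.contains pairs[idx].1 = false := by simpa using hc1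
            by_cases hc2 : u.contains pairs[idx].2 = true
            · simp only [hc1', hc2, Bool.not_true, Bool.not_false, Bool.true_and, Bool.false_eq_true, if_false]
              simp only [find_disjoint_pairs, hn', Bool.false_eq_true, if_false, e1, e2, hc1', hc2, Bool.false_or, if_true]
              exact ih (idx + 1) pairs cur u n b hk' hu
            · have hc2' : u.contains pairs[idx].2 = false := by simpa using hc2
              simp only [hc1', hc2', Bool.not_false, Bool.true_and, if_true]
              have hu' : ∀ x : Int, x ∈ PySem.Set.add (PySem.Set.add u pairs[idx].1) pairs[idx].2 ↔ x ∈ pvPts (cur ++ [pairs[idx]]) := by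
                intro x
                simp only [PySem.Set.mem_add, pvPts, List.flatMap_append, List.mem_append, hu x]
                simp
                exact or_assoc
              have hrec := ih (idx + 1) pairs (cur ++ [pairs[idx]]) (PySem.Set.add (PySem.Set.add u pairs[idx].1) pairs[idx].2) (n - 1) b hk' hu'
              simp only [find_disjoint_pairs, hn', Bool.false_eq_true, if_false, e1, e2, hc1', hc2', Bool.or_self, if_false]
              rw [hrec]
              cases hres : pvSearchB pairs (idx + 1) (PySem.Set.add (PySem.Set.add u pairs[idx].1) pairs[idx].2) (n - 1) b with
              | none =>
                simp only [pvInterp]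
                rw [if_pos (by simp)]
                exact ih (idx + 1) pairs cur u n b hk' hu
              | some rest =>
                simp only [pvInterp]
                rw [if_neg (by simp)]
                simp
        · simp only [hb, Bool.false_and, Bool.false_eq_true, if_false]
          exact ih (idx + 1) pairs cur u n b hk' hu
      · have hdrop : pairs.drop idx = [] := List.drop_eq_nil_of_le (by omega)
        rw [pvSearchB, hdrop]
        simp [find_disjoint_pairs, hn, hidx, pvInterp]

theorem maxRight_lt (l : List (Int × Int)) (b : Int) (hne : l ≠ []) (h : ∀ p ∈ l, p.2 < b) :
    pvMaxRight l < b := by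
  have hne' : l.map (fun p => p.2) ≠ [] := by simpa using hne
  obtain ⟨m, hm⟩ : ∃ m, PySem.List.max? (l.map (fun p => p.2)) (fun x => x) = some m := by
    rcases e : PySem.List.max? (l.map (fun p => p.2)) (fun x => x) with _ | m
    · rw [PySem.List.max?_eq_none_iff] at e; exact absurd e hne'
    · exact ⟨m, e⟩
  have hmem := PySem.List.max?_mem hm
  simp only [List.mem_map] at hmem
  obtain ⟨p, hp, hpm⟩ := hmem
  have := h p hp
  simp [pvMaxRight, hm]
  omega

theorem filter_lt_collapse (m b : Int) (hmb : m < b) (l : List (Int × Int)) :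
    (l.filter (fun p => decide (p.2 < b))).filter (fun p => decide (p.2 < m)) = l.filter (fun p => decide (p.2 < m)) := by
  induction l with
  | nil => simp
  | cons p t ih =>
    by_cases h1 : p.2 < m
    · have h2 : p.2 < b := lt_trans h1 hmb
      simp [h1, h2, ih]
    · by_cases h2 : p.2 < b <;> simp [h1, h2, ih]

theorem loop_eq (fuel : Nat) : ∀ (pairs apsA : List (Int × Int)) (n : Int) (best : List (Int × Int)),
    apsA.filter (fun p => decide (p.2 < pvMaxRight best)) = pairs.filter (fun p => decide (p.2 < pvMaxRight best)) →
    pvLoopA fuel apsA n best (pvMaxRight best) = pvLoopB fuel pairs n best := by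
  induction fuel with
  | zero => intro pairs apsA n best hinv; simp [pvLoopA, pvLoopB]
  | succ fuel ih =>
    intro pairs apsA n best hinv
    simp only [pvLoopA, pvLoopB]
    have hfeq : pvBOk (some (pvMaxRight best)) = (fun p : Int × Int => decide (p.2 < pvMaxRight best)) := by
      funext p; rfl
    have hcore := core_eq pairs.length 0 pairs [] PySem.Set.empty n (some (pvMaxRight best)) (by omega)
      (fun x => by simp [pvPts, PySem.Set.empty])
    rw [List.drop_zero, hfeq, ← hinv] at hcore
    cases hres : pvSearchB pairs 0 PySem.Set.empty n (some (pvMaxRight best)) with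
    | none =>
      rw [hres] at hcore
      simp only [pvInterp] at hcore
      rw [hcore]
      simp
    | some picks =>
      rw [hres] at hcore
      simp only [pvInterp, List.nil_append] at hcore
      by_cases hp : picks = []
      · subst hp
        rw [hcore]
        simp
      · rw [hcore]
        rw [if_pos (by simp [hp])]
        have hred : (match some picks with
            | none => best
            | some r => if (r == []) = true then best else pvLoopB fuel pairs n r) = pvLoopB fuel pairs n picks := by
          simp [hp]
        rw [hred]
        have hsub : ∀ p ∈ picks, p ∈ apsA.filter (fun p => decide (p.2 < pvMaxRight best)) := by
          rcases fdp_shape (apsA.filter (fun p => decide (p.2 < pvMaxRight best))) [] n with h | ⟨pk, he, hs⟩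
          · rw [h] at hcore; exact absurd hcore.symm hp
          · rw [he] at hcore
            simp only [List.nil_append] at hcore
            exact hcore ▸ hs
        have hlt : ∀ p ∈ picks, p.2 < pvMaxRight best := by
          intro p hp'
          have := hsub p hp'
          simp only [List.mem_filter, decide_eq_true_eq] at this
          exact this.2
        have hm : pvMaxRight picks < pvMaxRight best := maxRight_lt picks (pvMaxRight best) hp hlt
        apply ih
        rw [filter_lt_collapse _ _ hm apsA, ← filter_lt_collapse _ _ hm pairs, ← hinv]
        exact (filter_lt_collapse _ _ hm apsA).symm

-- ===== VERDICT (by name: the statement is the Claim_ definition above) =====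
theorem find_closest_disjoint_pairs_spec : Claim_equal_find_closest_disjoint_pairs := by
  unfold Claim_equal_find_closest_disjoint_pairs
  intro all_pairs n _
  unfold Spec_find_closest_disjoint_pairs
  unfold find_closest_disjoint_pairs find_closest_disjoint_pairs_alt
  have hfeq : pvBOk (none : Option Int) = (fun _ : Int × Int => true) := by funext p; rfl
  have hcore := core_eq all_pairs.length 0 all_pairs [] PySem.Set.empty n none (by omega)
    (fun x => by simp [pvPts, PySem.Set.empty])
  rw [List.drop_zero, hfeq, List.filter_true] at hcore
  cases hres : pvSearchB all_pairs 0 PySem.Set.empty n none with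
  | none =>
    rw [hres] at hcore
    simp only [pvInterp] at hcore
    simp [hcore]
  | some best =>
    rw [hres] at hcore
    simp only [pvInterp, List.nil_append] at hcore
    by_cases hb : best = []
    · subst hb
      simp [hcore]
    · simp only [hcore]
      rw [if_neg (by simp [hb]), if_neg (by simp [hb])]
      exact loop_eq (all_pairs.length + 1) all_pairs all_pairs n best rfl
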